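-- pv_equiv track=rewrite | github.com/y-oksaku/Competitive-Programming | AtCoder/abc/167f.py | calc
-- ===== SOURCE A (Python) =====
-- def calc(T):
--     now = 0
--     ret = 0
--     for s in T:
--         if s == '(':
--             now += 1
--         elif s == ')':
--             now -= 1
--         ret = min(ret, now)
--     return ret
-- ===== SOURCE B (Python) =====
-- def calc(T):
--     # Divide and conquer: each segment yields (total delta, min prefix balance
--     # including the empty prefix); segments combine by (s1+s2, min(m1, s1+m2)).
--     def go(seg):
--         n = len(seg)
--         if n == 0:
--             return (0, 0)
--         if n == 1:
--             d = 1 if seg == '(' else -1 if seg == ')' else 0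
--             return (d, min(0, d))
--         mid = n // 2
--         s1, m1 = go(seg[:mid])
--         s2, m2 = go(seg[mid:])
--         return (s1 + s2, min(m1, s1 + m2))
--     return go(T)[1]
-- ===== Notes on version B (the rewrite author's own statement) =====
-- stated objective: alternative
-- what changed: Replaces A's fused left-to-right scan maintaining (now, ret) with a divide-and-conquer: each half-segment is summarized as (total delta, min prefix balance) and the summaries combine with (s1+s2, min(m1, s1+m2)).
import Mathlib
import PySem

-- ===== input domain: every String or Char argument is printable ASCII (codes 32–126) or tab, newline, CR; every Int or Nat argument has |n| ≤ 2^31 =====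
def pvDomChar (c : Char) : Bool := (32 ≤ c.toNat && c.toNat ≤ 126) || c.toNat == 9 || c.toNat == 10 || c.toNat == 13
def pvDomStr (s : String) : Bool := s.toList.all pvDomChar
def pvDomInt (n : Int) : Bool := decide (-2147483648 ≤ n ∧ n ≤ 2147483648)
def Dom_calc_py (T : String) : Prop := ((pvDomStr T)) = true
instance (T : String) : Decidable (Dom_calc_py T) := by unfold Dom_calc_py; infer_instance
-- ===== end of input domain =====

-- B replaces A's fused single-pass (now, ret) scan by a divide-and-conquer on halves,
-- combining segment summaries (delta sum, min prefix balance); alternative algorithm, not faster.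

-- ===== PORT A =====
-- A's loop over T with state (now, ret)
def calcLoopA : List Char → Int → Int → Int
  | [], _, ret => ret
  | s :: rest, now, ret =>
    let now' := if s = '(' then now + 1 else if s = ')' then now - 1 else now
    calcLoopA rest now' (min ret now')

def calc_py (T : String) : Int := calcLoopA T.toList 0 0

-- ===== PORT B =====
def calcDelta (s : Char) : Int := if s = '(' then 1 else if s = ')' then -1 else 0

-- go(seg): (total delta of seg, min prefix balance of seg including the empty prefix)
def calcGo : List Char → Int × Int
  | [] => (0, 0)
  | [c] => (calcDelta c, min 0 (calcDelta c))
  | a :: b :: rest =>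
    let mid := (a :: b :: rest).length / 2
    let p1 := calcGo ((a :: b :: rest).take mid)
    let p2 := calcGo ((a :: b :: rest).drop mid)
    (p1.1 + p2.1, min p1.2 (p1.1 + p2.2))
termination_by l => l.length
decreasing_by
  · simp only [List.length_take, List.length_cons]; omega
  · simp only [List.length_drop, List.length_cons]; omega

def calc_py_alt (T : String) : Int := (calcGo T.toList).2

-- ===== PRECONDITION & SPEC =====
def Spec_calc_py (T : String) (out : Int) : Prop := out = calc_py_alt T
instance (T : String) (out : Int) : Decidable (Spec_calc_py T out) := by unfold Spec_calc_py; infer_instance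

-- ===== CLAIM (what is proved, stated in full; the proofs are below) =====
def Claim_equal_calc_py : Prop := ∀ (T : String), Dom_calc_py T → Spec_calc_py T (calc_py T)

-- ===== LEMMAS AND PROOFS =====

-- min prefix balance (including the empty prefix, which gives 0)
def pvM : List Char → Int
  | [] => 0
  | c :: r => min 0 (calcDelta c + pvM r)

def pvS (l : List Char) : Int := (l.map calcDelta).sum

theorem pvS_append (l1 l2 : List Char) : pvS (l1 ++ l2) = pvS l1 + pvS l2 := by
  simp [pvS]

theorem pvM_nonpos (l : List Char) : pvM l ≤ 0 := by
  cases l <;> simp [pvM]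

theorem pvM_append (l1 l2 : List Char) :
    pvM (l1 ++ l2) = min (pvM l1) (pvS l1 + pvM l2) := by
  induction l1 with
  | nil =>
    have := pvM_nonpos l2
    simp [pvM, pvS]; omega
  | cons c r ih =>
    simp only [List.cons_append, pvM, ih, pvS, List.map_cons, List.sum_cons]
    omega

theorem calcGo_eq (l : List Char) : calcGo l = (pvS l, pvM l) := by
  induction l using calcGo.induct with
  | case1 => simp [calcGo, pvS, pvM]
  | case2 c =>
    simp [calcGo, pvS, pvM]
  | case3 a b rest mid ih1 ih2 =>
    rw [calcGo]
    have hs : pvS (a :: b :: rest)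
        = pvS ((a :: b :: rest).take ((a :: b :: rest).length / 2))
          + pvS ((a :: b :: rest).drop ((a :: b :: rest).length / 2)) := by
      rw [← pvS_append, List.take_append_drop]
    have hm : pvM (a :: b :: rest)
        = min (pvM ((a :: b :: rest).take ((a :: b :: rest).length / 2)))
          (pvS ((a :: b :: rest).take ((a :: b :: rest).length / 2))
            + pvM ((a :: b :: rest).drop ((a :: b :: rest).length / 2))) := by
      conv_lhs => rw [← List.take_append_drop ((a :: b :: rest).length / 2) (a :: b :: rest)]
      rw [pvM_append]
    rw [ih1, ih2, hs, hm]

-- A's fused loop equals the running min via pvM, as long as ret ≤ now.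
theorem calcLoopA_eq (cs : List Char) : ∀ (now ret : Int), ret ≤ now →
    calcLoopA cs now ret = min ret (now + pvM cs) := by
  induction cs with
  | nil => intro now ret h; simp [calcLoopA, pvM]; omega
  | cons c rest ih =>
    intro now ret h
    have hd : (if c = '(' then now + 1 else if c = ')' then now - 1 else now)
        = now + calcDelta c := by
      unfold calcDelta; split_ifs <;> omega
    simp only [calcLoopA, hd]
    rw [ih (now + calcDelta c) (min ret (now + calcDelta c)) (by omega)]
    have := pvM_nonpos rest
    simp only [pvM]
    omega

theorem calc_py_eq (T : String) : calc_py T = calc_py_alt T := by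
  unfold calc_py calc_py_alt
  rw [calcLoopA_eq T.toList 0 0 le_rfl, calcGo_eq]
  have := pvM_nonpos T.toList
  simp; omega

-- ===== VERDICT (by name: the statement is the Claim_ definition above) =====
theorem calc_py_spec : Claim_equal_calc_py := by
  intro T _
  unfold Spec_calc_py
  exact calc_py_eq T
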